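-- pv_equiv track=rewrite | github.com/Graviti-AI/hit-cli | hit/utility.py | clean_commit_message
-- ===== SOURCE A (Python) =====
-- from typing import Iterable, List, NoReturn, Optional, Tuple
--
-- PR_CLOSED = "PR Closed: "
--
-- def clean_commit_message(lines: Iterable[str]) -> List[str]:
--     """Chean the commit message.
--
--     Arguments:
--         lines: The commite messsage lines.
--
--     Returns:
--         The commit message lines after cleaning.
--
--     """
--     results = []
--     is_blank = True
--     for line in lines:
--         line = line.rstrip()
--         if line.startswith("#"):
--             continue
--
--         if not line or line.startswith(PR_CLOSED):
--             if not is_blank: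
--                 is_blank = True
--                 results.append("")
--             continue
--
--         is_blank = False
--         results.append(line)
--
--     if not is_blank:
--         results.append("")
--
--     return results
-- ===== SOURCE B (Python) =====
-- PR_CLOSED = "PR Closed: "
--
--
-- def clean_commit_message(lines):
--     kept = [stripped for stripped in (line.rstrip() for line in lines)
--             if not stripped.startswith("#")]
--     results = []
--     paragraph = []
--     for line in kept:
--         if line and not line.startswith(PR_CLOSED):
--             paragraph.append(line)
--         elif paragraph:
--             results.extend(paragraph)
--             results.append("")
--             paragraph = []
--     if paragraph:
--         results.extend(paragraph)
--         results.append("")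
--     return results
-- ===== Notes on version B (the rewrite author's own statement) =====
-- stated objective: alternative
-- what changed: B first filters out comment lines over rstripped lines in a separate pass, then groups the remaining lines into paragraphs with a list buffer that is flushed (paragraph + one '') on each blank/PR-Closed boundary, instead of A's single pass with an is_blank boolean flag and per-line appends.
import Mathlib
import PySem

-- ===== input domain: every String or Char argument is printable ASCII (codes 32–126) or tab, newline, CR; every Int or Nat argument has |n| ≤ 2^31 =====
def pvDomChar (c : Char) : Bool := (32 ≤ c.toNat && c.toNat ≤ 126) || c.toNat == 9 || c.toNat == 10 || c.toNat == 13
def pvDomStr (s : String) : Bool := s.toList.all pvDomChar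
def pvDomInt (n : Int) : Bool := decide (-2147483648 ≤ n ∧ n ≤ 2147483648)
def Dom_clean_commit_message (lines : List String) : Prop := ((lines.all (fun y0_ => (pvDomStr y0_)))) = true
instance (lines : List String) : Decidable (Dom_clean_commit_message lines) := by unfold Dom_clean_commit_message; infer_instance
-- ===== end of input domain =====

-- B replaces A's is_blank flag with a filter pass plus a paragraph buffer flushed at blank boundaries; alternative decomposition, same cost.

-- ===== PORT A =====
-- A's loop body: rstrip, skip comments, blank/PR-Closed handling with the is_blank flag.
def cleanStepA (st : List String × Bool) (line : String) : List String × Bool :=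
  let line := PySem.Str.rstrip line
  if PySem.Str.startswith line "#" then st
  else if line = "" ∨ PySem.Str.startswith line "PR Closed: " then
    if st.2 = false then (st.1 ++ [""], true) else st
  else (st.1 ++ [line], false)

def clean_commit_message (lines : List String) : List String :=
  let st := lines.foldl cleanStepA ([], true)
  if st.2 = false then st.1 ++ [""] else st.1

-- ===== PORT B =====
-- B's loop body over the pre-filtered lines: buffer content in a paragraph, flush it with one "" at each boundary.
def cleanStepB (st : List String × List String) (line : String) : List String × List String :=
  if ¬ line = "" ∧ ¬ PySem.Str.startswith line "PR Closed: " then (st.1, st.2 ++ [line])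
  else if st.2 ≠ [] then (st.1 ++ st.2 ++ [""], []) else st

def clean_commit_message_alt (lines : List String) : List String :=
  let kept := (lines.map PySem.Str.rstrip).filter (fun s => !(PySem.Str.startswith s "#"))
  let st := kept.foldl cleanStepB ([], [])
  if st.2 ≠ [] then st.1 ++ st.2 ++ [""] else st.1

-- ===== PRECONDITION & SPEC =====
def Spec_clean_commit_message (lines : List String) (out : List String) : Prop := out = clean_commit_message_alt lines
instance (lines : List String) (out : List String) : Decidable (Spec_clean_commit_message lines out) := by unfold Spec_clean_commit_message; infer_instance

-- ===== CLAIM (what is proved, stated in full; the proofs are below) =====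
def Claim_equal_clean_commit_message : Prop := ∀ (lines : List String), Dom_clean_commit_message lines → Spec_clean_commit_message lines (clean_commit_message lines)

-- ===== LEMMAS AND PROOFS =====

-- A's loop body on already-rstripped, non-comment lines.
def coreA (st : List String × Bool) (line : String) : List String × Bool :=
  if line = "" ∨ PySem.Str.startswith line "PR Closed: " then
    if st.2 = false then (st.1 ++ [""], true) else st
  else (st.1 ++ [line], false)

-- A's fold over raw lines equals the coreA fold over the rstripped, comment-filtered lines.
theorem foldA_filter (lines : List String) (st : List String × Bool) :
    lines.foldl cleanStepA st
      = ((lines.map PySem.Str.rstrip).filter (fun s => !(PySem.Str.startswith s "#"))).foldl coreA st := by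
  induction lines generalizing st with
  | nil => rfl
  | cons l ls ih =>
    simp only [List.map_cons, List.filter_cons, List.foldl_cons]
    by_cases h : PySem.Str.startswith (PySem.Str.rstrip l) "#" = true
    · have hs : cleanStepA st l = st := by simp at h; simp [cleanStepA, h]
      simp at h
      rw [hs, if_neg (by simp [h]), ih]
    · have hs : cleanStepA st l = coreA st (PySem.Str.rstrip l) := by
        simp at h; simp [cleanStepA, coreA, h]
      simp at h
      rw [hs, if_pos (by simp [h]), List.foldl_cons, ih]

-- state correspondence: A's state is (res ++ para, para = []) for B's state (res, para).
theorem core_corr (kept : List String) (res para : List String) :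
    (let st := kept.foldl coreA (res ++ para, decide (para = []));
     if st.2 = false then st.1 ++ [""] else st.1)
      = (let st := kept.foldl cleanStepB (res, para);
         if st.2 ≠ [] then st.1 ++ st.2 ++ [""] else st.1) := by
  induction kept generalizing res para with
  | nil =>
    by_cases h : para = [] <;> simp [h]
  | cons s ks ih =>
    simp only [List.foldl_cons]
    by_cases h1 : s = ""
    · by_cases hp : para = []
      · have hB : cleanStepB (res, para) s = (res, para) := by simp [cleanStepB, h1, hp]
        have hA : coreA (res ++ para, decide (para = [])) s = (res, true) := by
          simp [coreA, h1, hp]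
        rw [hA, hB, hp]
        simpa using ih res []
      · have hB : cleanStepB (res, para) s = (res ++ para ++ [""], []) := by simp [cleanStepB, h1, hp]
        have hA : coreA (res ++ para, decide (para = [])) s = (res ++ para ++ [""], true) := by
          simp [coreA, h1, hp]
        rw [hA, hB]
        simpa using ih (res ++ para ++ [""]) []
    · by_cases h2 : PySem.Str.startswith s "PR Closed: " = true
      · by_cases hp : para = []
        · have hB : cleanStepB (res, para) s = (res, para) := by
            simp at h2; simp [cleanStepB, h2, hp]
          have hA : coreA (res ++ para, decide (para = [])) s = (res, true) := by
            simp at h2; simp [coreA, h2, hp]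
          rw [hA, hB, hp]
          simpa using ih res []
        · have hB : cleanStepB (res, para) s = (res ++ para ++ [""], []) := by
            simp at h2; simp [cleanStepB, h2, hp]
          have hA : coreA (res ++ para, decide (para = [])) s = (res ++ para ++ [""], true) := by
            simp at h2; simp [coreA, h2, hp]
          rw [hA, hB]
          simpa using ih (res ++ para ++ [""]) []
      · have hB : cleanStepB (res, para) s = (res, para ++ [s]) := by
          simp at h2; simp [cleanStepB, h1, h2]
        have hA : coreA (res ++ para, decide (para = [])) s = (res ++ (para ++ [s]), decide ((para ++ [s]) = [])) := by
          simp at h2; simp [coreA, h1, h2]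
        rw [hA, hB]
        exact ih res (para ++ [s])

-- ===== VERDICT (by name: the statement is the Claim_ definition above) =====
theorem clean_commit_message_spec : Claim_equal_clean_commit_message := by
  intro lines _
  show clean_commit_message lines = clean_commit_message_alt lines
  unfold clean_commit_message clean_commit_message_alt
  rw [foldA_filter]
  simpa using core_corr ((lines.map PySem.Str.rstrip).filter (fun s => !(PySem.Str.startswith s "#"))) [] []
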